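-- pv_equiv track=rewrite | github.com/TeissierYannis/py-toolbox | matrix.py | creerMatrice
-- ===== SOURCE A (Python) =====
-- def creerMatrice(pTaille, pType=0):
--     """
--     Créer un matrice carrée de taille pTaille avec des
--     pType = 0 : toutes les valeurs à 0
--     pType = 1 : matrice identité
--     pType = 123 : augmente chaque valeur de 1
--     """
--     pas = 0
--     val = 0
--     if pType == 123:
--         pas = 1
--         val = 1
--     valRen = []
--     for i in range(pTaille):
--         valRen.append([])
--         for j in range(pTaille):
--             valRen[-1].append(val)
--             val += pas
--     return valRen
-- ===== SOURCE B (Python) =====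
-- def creerMatrice(pTaille, pType=0):
--     if pType == 123:
--         return [[i * pTaille + j + 1 for j in range(pTaille)] for i in range(pTaille)]
--     return [[0] * pTaille for _ in range(pTaille)]
-- ===== Notes on version B (the rewrite author's own statement) =====
-- stated objective: simpler
-- what changed: B branches on pType==123 up front and computes each cell directly from its row/column indices (i*pTaille+j+1) in comprehensions, or builds zero rows with [0]*pTaille, instead of threading a mutable val/pas accumulator through nested explicit loops with repeated append to valRen[-1]; the comprehension/replication avoids A's per-cell append and negative-index lookup, a constant-factor win.
import Mathlib
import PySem

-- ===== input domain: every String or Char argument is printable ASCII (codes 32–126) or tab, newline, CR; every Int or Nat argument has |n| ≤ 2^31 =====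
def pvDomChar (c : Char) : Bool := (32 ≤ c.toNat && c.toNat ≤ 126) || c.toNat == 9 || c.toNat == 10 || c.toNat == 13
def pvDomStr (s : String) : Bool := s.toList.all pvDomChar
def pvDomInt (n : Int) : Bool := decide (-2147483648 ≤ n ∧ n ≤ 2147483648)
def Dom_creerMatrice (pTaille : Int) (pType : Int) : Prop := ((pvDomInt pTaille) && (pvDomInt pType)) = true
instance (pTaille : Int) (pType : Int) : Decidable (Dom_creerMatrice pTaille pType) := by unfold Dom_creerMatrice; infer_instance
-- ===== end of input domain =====

-- B replaces A's mutable val/pas accumulator threaded through nested loops with a direct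
-- per-cell formula (i*pTaille+j+1) for pType == 123 and constant zero rows otherwise (simpler).

-- ===== PORT A =====
def creerMatrice (pTaille : Int) (pType : Int) : List (List Int) :=
  let pas : Int := if pType == 123 then 1 else 0
  let val : Int := if pType == 123 then 1 else 0
  let res := (PySem.List.pyRange 0 pTaille 1).foldl
    (fun (st : Int × List (List Int)) _ =>
      let inner := (PySem.List.pyRange 0 pTaille 1).foldl
        (fun (st2 : Int × List Int) _ => (st2.1 + pas, st2.2 ++ [st2.1])) (st.1, ([] : List Int))
      (inner.1, st.2 ++ [inner.2]))
    (val, ([] : List (List Int)))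
  res.2

-- ===== PORT B =====
def creerMatrice_alt (pTaille : Int) (pType : Int) : List (List Int) :=
  if pType == 123 then
    (PySem.List.pyRange 0 pTaille 1).map (fun i =>
      (PySem.List.pyRange 0 pTaille 1).map (fun j => i * pTaille + j + 1))
  else
    (PySem.List.pyRange 0 pTaille 1).map (fun _ => List.replicate pTaille.toNat 0)

-- ===== PRECONDITION & SPEC =====
def Spec_creerMatrice (pTaille : Int) (pType : Int) (out : List (List Int)) : Prop := out = creerMatrice_alt pTaille pType
instance (pTaille : Int) (pType : Int) (out : List (List Int)) : Decidable (Spec_creerMatrice pTaille pType out) := by unfold Spec_creerMatrice; infer_instance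

-- ===== CLAIM (what is proved, stated in full; the proofs are below) =====
def Claim_equal_creerMatrice : Prop := ∀ (pTaille : Int) (pType : Int), Dom_creerMatrice pTaille pType → Spec_creerMatrice pTaille pType (creerMatrice pTaille pType)

-- ===== LEMMAS AND PROOFS =====

-- A's inner loop: append val, step by pas, over an arbitrary list (only its length matters).
theorem inner_fold (l : List Int) (pas v : Int) (acc : List Int) :
    l.foldl (fun (st2 : Int × List Int) _ => (st2.1 + pas, st2.2 ++ [st2.1])) (v, acc)
      = (v + l.length * pas, acc ++ (List.range l.length).map (fun (j : Nat) => v + (j : Int) * pas)) := by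
  induction l generalizing v acc with
  | nil => simp
  | cons x t ih =>
      simp only [List.foldl_cons, ih, List.length_cons, List.range_succ_eq_map,
        List.map_cons, List.map_map, Prod.mk.injEq]
      constructor
      · push_cast; ring
      · rw [List.append_assoc, List.singleton_append]
        congr 2
        · push_cast; ring
        · apply List.map_congr_left; intro j _
          simp only [Function.comp]; push_cast; ring

-- A's outer loop, with the inner loop already characterised.
theorem outer_fold (l M : List Int) (pas v : Int) (rows : List (List Int)) :
    l.foldl (fun (st : Int × List (List Int)) _ =>
        let inner := M.foldl
          (fun (st2 : Int × List Int) _ => (st2.1 + pas, st2.2 ++ [st2.1])) (st.1, ([] : List Int))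
        (inner.1, st.2 ++ [inner.2])) (v, rows)
      = (v + l.length * (M.length * pas),
         rows ++ (List.range l.length).map (fun i =>
           (List.range M.length).map (fun j => v + ((i * M.length + j : Nat) : Int) * pas))) := by
  induction l generalizing v rows with
  | nil => simp
  | cons x t ih =>
      rw [List.foldl_cons]
      have hstep : (let inner := (M.foldl
            (fun (st2 : Int × List Int) _ => (st2.1 + pas, st2.2 ++ [st2.1]))
            (((v, rows) : Int × List (List Int)).1, ([] : List Int)));
          ((inner.1 : Int), (v, rows).2 ++ [inner.2]))
          = ((v + M.length * pas : Int),
             rows ++ [(List.range M.length).map (fun (j : Nat) => v + (j : Int) * pas)]) := by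
        simp [inner_fold]
      rw [hstep, ih]
      simp only [List.length_cons, List.range_succ_eq_map, List.map_cons, List.map_map,
        Prod.mk.injEq]
      constructor
      · push_cast; ring
      · rw [List.append_assoc, List.singleton_append]
        congr 2
        · apply List.map_congr_left; intro j _; push_cast; ring
        · apply List.map_congr_left; intro i _
          simp only [Function.comp]
          apply List.map_congr_left; intro j _; push_cast; ring

-- ===== VERDICT (by name: the statement is the Claim_ definition above) =====
theorem creerMatrice_spec : Claim_equal_creerMatrice := by
  intro pTaille pType _
  show creerMatrice pTaille pType = creerMatrice_alt pTaille pType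
  unfold creerMatrice creerMatrice_alt
  by_cases h : 0 ≤ pTaille
  · simp only [outer_fold, PySem.List.pyRange_one, List.length_map, List.length_range,
      List.nil_append, List.map_map]
    have hN : (((pTaille - 0).toNat : Int)) = pTaille := by omega
    by_cases ht : pType = 123
    · simp only [ht, beq_self_eq_true, if_true]
      apply List.map_congr_left
      intro i _
      apply List.map_congr_left
      intro j _
      simp only [Function.comp]
      push_cast [hN]
      ring
    · have hbt : (pType == 123) = false := by simp [ht]
      simp only [hbt, Bool.false_eq_true, if_false]
      apply List.map_congr_left
      intro i _
      have h2 : (pTaille - 0).toNat = pTaille.toNat := by omega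
      simp [h2, Function.comp, List.eq_replicate_iff]
  · have hnil : PySem.List.pyRange 0 pTaille 1 = [] := by
      apply PySem.List.pyRange_one_eq_nil; omega
    simp [hnil]
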